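-- pv_equiv track=rewrite | github.com/andyhedges/armcrunch | arm64/fftgen.py | _mov_imm
-- ===== SOURCE A (Python) =====
-- def _mov_imm(reg: str, value: int) -> list[str]:
--     """
--     Emit movz/movk sequence for a 64-bit immediate.
--
--     This intentionally avoids pseudo-`mov` for large immediates.
--     """
--     value_u = value & ((1 << 64) - 1)
--     chunks = [(value_u >> shift) & 0xFFFF for shift in (0, 16, 32, 48)]
--
--     if all(chunk == 0 for chunk in chunks):
--         return [f"movz {reg}, #0"]
--
--     lines: list[str] = []
--     first = True
--     for idx, chunk in enumerate(chunks):
--         if chunk == 0 and first: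
--             continue
--         shift = idx * 16
--         if first:
--             if shift == 0:
--                 lines.append(f"movz {reg}, #{chunk}")
--             else:
--                 lines.append(f"movz {reg}, #{chunk}, lsl #{shift}")
--             first = False
--         elif chunk != 0:
--             lines.append(f"movk {reg}, #{chunk}, lsl #{shift}")
--     return lines
-- ===== SOURCE B (Python) =====
-- def _movk_rest(reg, u, shift):
--     if u == 0:
--         return []
--     chunk = u & 0xFFFF
--     rest = _movk_rest(reg, u >> 16, shift + 16)
--     return ([f"movk {reg}, #{chunk}, lsl #{shift}"] if chunk else []) + rest
--
--
-- def _movz_first(reg, u, shift):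
--     chunk = u & 0xFFFF
--     if chunk == 0:
--         return _movz_first(reg, u >> 16, shift + 16)
--     head = f"movz {reg}, #{chunk}" if shift == 0 else f"movz {reg}, #{chunk}, lsl #{shift}"
--     return [head] + _movk_rest(reg, u >> 16, shift + 16)
--
--
-- def _mov_imm(reg: str, value: int) -> list[str]:
--     u = value & ((1 << 64) - 1)
--     if u == 0:
--         return [f"movz {reg}, #0"]
--     return _movz_first(reg, u, 0)
-- ===== Notes on version B (the rewrite author's own statement) =====
-- stated objective: alternative
-- what changed: Replaces A's fixed four-chunk list walked with an enumerate loop and a 'first' flag by recursive descent on the masked value itself: a pair of recursive helpers consume 16 bits per step and stop as soon as the remaining value is zero (no chunk list, no flag, no fixed iteration count).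
import Mathlib
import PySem

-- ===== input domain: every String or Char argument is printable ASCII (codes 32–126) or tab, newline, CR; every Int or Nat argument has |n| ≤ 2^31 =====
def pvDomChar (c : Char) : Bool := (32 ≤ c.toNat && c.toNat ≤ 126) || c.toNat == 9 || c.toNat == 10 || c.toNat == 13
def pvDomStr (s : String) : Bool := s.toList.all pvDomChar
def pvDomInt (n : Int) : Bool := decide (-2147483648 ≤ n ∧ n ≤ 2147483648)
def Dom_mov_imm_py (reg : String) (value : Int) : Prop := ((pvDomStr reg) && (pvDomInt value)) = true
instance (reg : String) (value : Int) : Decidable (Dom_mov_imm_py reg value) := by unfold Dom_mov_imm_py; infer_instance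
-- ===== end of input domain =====

-- B replaces A's fixed four-chunk loop with a 'first' flag by recursive descent on the
-- masked value itself, consuming 16 bits per step until the remaining value is zero
-- (objective: alternative decomposition, same cost).


-- ===== PORT A =====
def mov_imm_py (reg : String) (value : Int) : List String :=
  let value_u := PySem.Int.band value ((1 <<< 64) - 1)
  let chunks : List Int :=
    ([0, 16, 32, 48] : List Nat).map (fun (shift : Nat) => PySem.Int.band (value_u >>> shift) 0xFFFF)
  if chunks.all (fun chunk => chunk == 0) then
    ["movz " ++ reg ++ ", #0"]
  else
    ((PySem.List.enumerate chunks).foldl (fun (st : List String × Bool) p =>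
      let lines := st.1
      let first := st.2
      let idx := p.1
      let chunk := p.2
      if chunk == 0 && first then st
      else
        let shift := idx * 16
        if first then
          if shift == 0 then
            (lines ++ ["movz " ++ reg ++ ", #" ++ PySem.Int.toStr chunk], false)
          else
            (lines ++ ["movz " ++ reg ++ ", #" ++ PySem.Int.toStr chunk ++ ", lsl #" ++ PySem.Int.toStr shift], false)
        else if chunk != 0 then
          (lines ++ ["movk " ++ reg ++ ", #" ++ PySem.Int.toStr chunk ++ ", lsl #" ++ PySem.Int.toStr shift], first)
        else st) ([], true)).1

-- ===== PORT B =====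
-- Source B works on u = value & (2^64-1), which is nonnegative, so u is represented
-- as a Nat (exact); '>>' and '&' are Nat's '>>>'/'&&&' there.

-- termination helper for the recursive descent (cited by decreasing_by)
theorem pvShift16_lt (u : Nat) (h : ¬ u = 0) : u >>> 16 < u := by
  rw [Nat.shiftRight_eq_div_pow]
  exact Nat.div_lt_self (Nat.pos_of_ne_zero h) (by norm_num)

def movkRest (reg : String) (u : Nat) (shift : Nat) : List String :=
  if h : u = 0 then []
  else
    let chunk := u &&& 0xFFFF
    let rest := movkRest reg (u >>> 16) (shift + 16)
    (if chunk ≠ 0 then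
      ["movk " ++ reg ++ ", #" ++ PySem.Int.toStr (chunk : Int) ++ ", lsl #" ++ PySem.Int.toStr (shift : Int)]
     else []) ++ rest
termination_by u
decreasing_by exact pvShift16_lt u h

-- Source B's _movz_first is only called with u ≠ 0; the 'u = 0 → []' branch is a
-- termination guard only (unreachable from the caller).
def movzFirst (reg : String) (u : Nat) (shift : Nat) : List String :=
  if h : u = 0 then []
  else
    let chunk := u &&& 0xFFFF
    if chunk = 0 then movzFirst reg (u >>> 16) (shift + 16)
    else
      let head :=
        if shift = 0 then "movz " ++ reg ++ ", #" ++ PySem.Int.toStr (chunk : Int)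
        else "movz " ++ reg ++ ", #" ++ PySem.Int.toStr (chunk : Int) ++ ", lsl #" ++ PySem.Int.toStr (shift : Int)
      head :: movkRest reg (u >>> 16) (shift + 16)
termination_by u
decreasing_by exact pvShift16_lt u h

def mov_imm_py_alt (reg : String) (value : Int) : List String :=
  let u : Nat := (PySem.Int.band value ((1 <<< 64) - 1)).toNat
  if u = 0 then ["movz " ++ reg ++ ", #0"]
  else movzFirst reg u 0

-- ===== PRECONDITION & SPEC =====
def Spec_mov_imm_py (reg : String) (value : Int) (out : List String) : Prop := out = mov_imm_py_alt reg value
instance (reg : String) (value : Int) (out : List String) : Decidable (Spec_mov_imm_py reg value out) := by unfold Spec_mov_imm_py; infer_instance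

-- ===== CLAIM =====
def Claim_equal_mov_imm_py : Prop := ∀ (reg : String) (value : Int), Dom_mov_imm_py reg value → Spec_mov_imm_py reg value (mov_imm_py reg value)

-- ===== LEMMAS AND PROOFS =====

-- the masked value is a 64-bit nonnegative integer
theorem band_mask_nonneg (value : Int) : 0 ≤ PySem.Int.band value ((1 <<< 64) - 1) := by
  have hm : (0 : Int) ≤ (1 <<< 64) - 1 := by decide
  unfold PySem.Int.band
  split_ifs <;> positivity

theorem band_mask_lt (value : Int) : (PySem.Int.band value ((1 <<< 64) - 1)).toNat < 2 ^ 64 := by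
  have hm : ((1 <<< 64) - 1 : Int) = ((2 ^ 64 - 1 : Nat) : Int) := by decide
  unfold PySem.Int.band
  split_ifs with h1 h2 h2
  · have := Nat.and_le_right (n := value.toNat) (m := ((1 <<< 64) - 1 : Int).toNat)
    simp only [Int.toNat_natCast]
    calc value.toNat &&& ((1 <<< 64) - 1 : Int).toNat ≤ ((1 <<< 64) - 1 : Int).toNat := Nat.and_le_right
      _ < 2 ^ 64 := by rw [hm]; simp
  · exact absurd (by rw [hm]; positivity) h2
  · simp only [Int.toNat_natCast]
    calc ((1 <<< 64) - 1 : Int).toNat - (((1 <<< 64) - 1 : Int).toNat &&& (-value - 1).toNat)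
        ≤ ((1 <<< 64) - 1 : Int).toNat := Nat.sub_le _ _
      _ < 2 ^ 64 := by rw [hm]; simp
  · exact absurd (by rw [hm]; positivity) h2

theorem chunk_cast (n s : Nat) :
    PySem.Int.band ((n : Int) >>> s) 0xFFFF = (((n >>> s) &&& 0xFFFF : Nat) : Int) := by
  have h1 : ((n : Int) >>> s) = ((n >>> s : Nat) : Int) := by
    simp
  rw [h1]
  have h2 : (0xFFFF : Int) = ((0xFFFF : Nat) : Int) := by norm_num
  rw [h2, PySem.Int.band_natCast]

theorem chunk_mod (n s : Nat) : (n >>> s) &&& 0xFFFF = n / 2 ^ s % 2 ^ 16 := by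
  have : (0xFFFF : Nat) = 2 ^ 16 - 1 := by norm_num
  rw [this, Nat.and_two_pow_sub_one_eq_mod, Nat.shiftRight_eq_div_pow]

theorem movkRest_zero (reg : String) (s : Nat) : movkRest reg 0 s = [] := by
  rw [movkRest]
  simp

theorem movkRest_unfold (reg : String) (u s : Nat) :
    movkRest reg u s =
      (if u &&& 0xFFFF ≠ 0 then
        ["movk " ++ reg ++ ", #" ++ PySem.Int.toStr ((u &&& 0xFFFF : Nat) : Int) ++ ", lsl #" ++ PySem.Int.toStr (s : Int)]
       else []) ++ movkRest reg (u >>> 16) (s + 16) := by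
  by_cases h : u = 0
  · subst h
    simp [movkRest_zero]
  · rw [movkRest]
    simp [h]

theorem movzFirst_unfold (reg : String) (u s : Nat) (h : u ≠ 0) :
    movzFirst reg u s =
      if u &&& 0xFFFF = 0 then movzFirst reg (u >>> 16) (s + 16)
      else
        (if s = 0 then "movz " ++ reg ++ ", #" ++ PySem.Int.toStr ((u &&& 0xFFFF : Nat) : Int)
         else "movz " ++ reg ++ ", #" ++ PySem.Int.toStr ((u &&& 0xFFFF : Nat) : Int) ++ ", lsl #" ++ PySem.Int.toStr (s : Int))
        :: movkRest reg (u >>> 16) (s + 16) := by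
  rw [movzFirst]
  simp [h]

theorem shr_add (m a b : Nat) : m >>> a >>> b = m >>> (a + b) := (Nat.shiftRight_add m a b).symm

theorem movkRest1 (reg : String) (m s : Nat) (hm : m >>> 16 = 0) :
    movkRest reg m s =
      (if m &&& 0xFFFF ≠ 0 then
        ["movk " ++ reg ++ ", #" ++ PySem.Int.toStr ((m &&& 0xFFFF : Nat) : Int) ++ ", lsl #" ++ PySem.Int.toStr (s : Int)]
       else []) := by
  rw [movkRest_unfold, hm, movkRest_zero, List.append_nil]

theorem movkRest2 (reg : String) (m s : Nat) (hm : m >>> 32 = 0) :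
    movkRest reg m s =
      (if m &&& 0xFFFF ≠ 0 then
        ["movk " ++ reg ++ ", #" ++ PySem.Int.toStr ((m &&& 0xFFFF : Nat) : Int) ++ ", lsl #" ++ PySem.Int.toStr (s : Int)]
       else []) ++
      (if (m >>> 16) &&& 0xFFFF ≠ 0 then
        ["movk " ++ reg ++ ", #" ++ PySem.Int.toStr (((m >>> 16) &&& 0xFFFF : Nat) : Int) ++ ", lsl #" ++ PySem.Int.toStr ((s + 16 : Nat) : Int)]
       else []) := by
  rw [movkRest_unfold, movkRest1 reg (m >>> 16) (s + 16) (by rw [shr_add]; exact hm)]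

theorem movkRest3 (reg : String) (m s : Nat) (hm : m >>> 48 = 0) :
    movkRest reg m s =
      (if m &&& 0xFFFF ≠ 0 then
        ["movk " ++ reg ++ ", #" ++ PySem.Int.toStr ((m &&& 0xFFFF : Nat) : Int) ++ ", lsl #" ++ PySem.Int.toStr (s : Int)]
       else []) ++
      ((if (m >>> 16) &&& 0xFFFF ≠ 0 then
        ["movk " ++ reg ++ ", #" ++ PySem.Int.toStr (((m >>> 16) &&& 0xFFFF : Nat) : Int) ++ ", lsl #" ++ PySem.Int.toStr ((s + 16 : Nat) : Int)]
       else []) ++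
      (if (m >>> 32) &&& 0xFFFF ≠ 0 then
        ["movk " ++ reg ++ ", #" ++ PySem.Int.toStr (((m >>> 32) &&& 0xFFFF : Nat) : Int) ++ ", lsl #" ++ PySem.Int.toStr ((s + 32 : Nat) : Int)]
       else [])) := by
  rw [movkRest_unfold, movkRest2 reg (m >>> 16) (s + 16) (by rw [shr_add]; exact hm)]
  simp [shr_add, add_assoc]

theorem and_mask_ne_zero {m : Nat} (h : m &&& 0xFFFF ≠ 0) : m ≠ 0 := by
  intro hm
  exact h (by rw [hm]; rfl)

theorem shr_ne_zero {n : Nat} (a b : Nat) (h : n >>> (a + b) ≠ 0) : n >>> a ≠ 0 := by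
  intro hm
  exact h (by rw [← shr_add, hm, Nat.zero_shiftRight])

theorem lsl16 : (", lsl #" ++ "16" : String) = ", lsl #16" := by decide
theorem lsl32 : (", lsl #" ++ "32" : String) = ", lsl #32" := by decide
theorem lsl48 : (", lsl #" ++ "48" : String) = ", lsl #48" := by decide

theorem movzFirst_closed (reg : String) (n : Nat) (h64 : n >>> 64 = 0) (hne : n ≠ 0) :
    movzFirst reg n 0 =
      if n &&& 0xFFFF ≠ 0 then
        ("movz " ++ reg ++ ", #" ++ PySem.Int.toStr ((n &&& 0xFFFF : Nat) : Int)) ::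
          ((if (n >>> 16) &&& 0xFFFF ≠ 0 then
              ["movk " ++ reg ++ ", #" ++ PySem.Int.toStr (((n >>> 16) &&& 0xFFFF : Nat) : Int) ++ ", lsl #16"]
            else []) ++
           ((if (n >>> 32) &&& 0xFFFF ≠ 0 then
              ["movk " ++ reg ++ ", #" ++ PySem.Int.toStr (((n >>> 32) &&& 0xFFFF : Nat) : Int) ++ ", lsl #32"]
            else []) ++
           (if (n >>> 48) &&& 0xFFFF ≠ 0 then
              ["movk " ++ reg ++ ", #" ++ PySem.Int.toStr (((n >>> 48) &&& 0xFFFF : Nat) : Int) ++ ", lsl #48"]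
            else [])))
      else if (n >>> 16) &&& 0xFFFF ≠ 0 then
        ("movz " ++ reg ++ ", #" ++ PySem.Int.toStr (((n >>> 16) &&& 0xFFFF : Nat) : Int) ++ ", lsl #16") ::
          ((if (n >>> 32) &&& 0xFFFF ≠ 0 then
              ["movk " ++ reg ++ ", #" ++ PySem.Int.toStr (((n >>> 32) &&& 0xFFFF : Nat) : Int) ++ ", lsl #32"]
            else []) ++
           (if (n >>> 48) &&& 0xFFFF ≠ 0 then
              ["movk " ++ reg ++ ", #" ++ PySem.Int.toStr (((n >>> 48) &&& 0xFFFF : Nat) : Int) ++ ", lsl #48"]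
            else []))
      else if (n >>> 32) &&& 0xFFFF ≠ 0 then
        ("movz " ++ reg ++ ", #" ++ PySem.Int.toStr (((n >>> 32) &&& 0xFFFF : Nat) : Int) ++ ", lsl #32") ::
          (if (n >>> 48) &&& 0xFFFF ≠ 0 then
              ["movk " ++ reg ++ ", #" ++ PySem.Int.toStr (((n >>> 48) &&& 0xFFFF : Nat) : Int) ++ ", lsl #48"]
            else [])
      else
        ["movz " ++ reg ++ ", #" ++ PySem.Int.toStr (((n >>> 48) &&& 0xFFFF : Nat) : Int) ++ ", lsl #48"] := by
  have hlt : n < 2 ^ 64 := by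
    rw [Nat.shiftRight_eq_div_pow] at h64
    omega
  have hts16 : PySem.Int.toStr (16 : Int) = "16" := by decide
  have hts32 : PySem.Int.toStr (32 : Int) = "32" := by decide
  have hts48 : PySem.Int.toStr (48 : Int) = "48" := by decide
  by_cases h0 : n &&& 0xFFFF = 0
  · by_cases h1 : (n >>> 16) &&& 0xFFFF = 0
    · by_cases h2 : (n >>> 32) &&& 0xFFFF = 0
      · by_cases h3 : (n >>> 48) &&& 0xFFFF = 0
        · -- all chunks zero: contradicts hne
          exfalso
          apply hne
          have e0 := chunk_mod n 0
          have e1 := chunk_mod n 16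
          have e2 := chunk_mod n 32
          have e3 := chunk_mod n 48
          rw [Nat.shiftRight_zero] at e0
          rw [e0] at h0; rw [e1] at h1; rw [e2] at h2; rw [e3] at h3
          omega
        · -- first nonzero chunk at shift 48
          have k48 : n >>> 48 ≠ 0 := and_mask_ne_zero h3
          have k32 : n >>> 32 ≠ 0 := shr_ne_zero 32 16 k48
          have k16 : n >>> 16 ≠ 0 := shr_ne_zero 16 16 k32
          rw [movzFirst_unfold reg n 0 hne, if_pos h0]
          norm_num [shr_add]
          rw [movzFirst_unfold reg (n >>> 16) 16 k16, if_pos h1]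
          norm_num [shr_add]
          rw [movzFirst_unfold reg (n >>> 32) 32 k32, if_pos h2]
          norm_num [shr_add]
          rw [movzFirst_unfold reg (n >>> 48) 48 k48, if_neg (by simpa using h3)]
          norm_num [shr_add, h64, movkRest_zero]
          simp [h0, h1, h2, hts48, String.append_assoc, lsl48]
      · -- first nonzero chunk at shift 32
        have k32 : n >>> 32 ≠ 0 := and_mask_ne_zero h2
        have k16 : n >>> 16 ≠ 0 := shr_ne_zero 16 16 k32
        rw [movzFirst_unfold reg n 0 hne, if_pos h0]
        norm_num [shr_add]
        rw [movzFirst_unfold reg (n >>> 16) 16 k16, if_pos h1]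
        norm_num [shr_add]
        rw [movzFirst_unfold reg (n >>> 32) 32 k32, if_neg (by simpa using h2)]
        rw [movkRest1 reg (n >>> 32 >>> 16) (32 + 16) (by rw [shr_add, shr_add]; exact h64)]
        simp [h0, h1, h2, shr_add, hts32, hts48, String.append_assoc, lsl32, lsl48]
    · -- first nonzero chunk at shift 16
      have k16 : n >>> 16 ≠ 0 := and_mask_ne_zero h1
      rw [movzFirst_unfold reg n 0 hne, if_pos h0]
      norm_num [shr_add]
      rw [movzFirst_unfold reg (n >>> 16) 16 k16, if_neg (by simpa using h1)]
      rw [movkRest2 reg (n >>> 16 >>> 16) (16 + 16) (by rw [shr_add, shr_add]; exact h64)]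
      simp [h0, h1, shr_add, hts16, hts32, hts48, String.append_assoc, lsl16, lsl32, lsl48]
  · -- first nonzero chunk at shift 0
    rw [movzFirst_unfold reg n 0 hne, if_neg (by simpa using h0)]
    rw [movkRest3 reg (n >>> 16) 16 (by rw [shr_add]; exact h64)]
    simp [h0, shr_add, hts16, hts32, hts48, String.append_assoc, lsl16, lsl32, lsl48]

theorem main_eq (reg : String) (value : Int) :
    mov_imm_py reg value = mov_imm_py_alt reg value := by
  have hnn := band_mask_nonneg value
  have hlt := band_mask_lt value
  obtain ⟨n, hn⟩ : ∃ m : Nat, PySem.Int.band value ((1 <<< 64) - 1) = (m : Int) :=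
    ⟨_, (Int.toNat_of_nonneg hnn).symm⟩
  rw [hn, Int.toNat_natCast] at hlt
  have h64 : n >>> 64 = 0 := by
    rw [Nat.shiftRight_eq_div_pow]
    omega
  simp only [mov_imm_py, mov_imm_py_alt, hn, Int.toNat_natCast, List.map_cons, List.map_nil,
    chunk_cast, Nat.shiftRight_zero]
  have e0 := chunk_mod n 0
  have e1 := chunk_mod n 16
  have e2 := chunk_mod n 32
  have e3 := chunk_mod n 48
  rw [Nat.shiftRight_zero] at e0
  by_cases h0 : n &&& 0xFFFF = 0 <;>
  by_cases h1 : (n >>> 16) &&& 0xFFFF = 0 <;>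
  by_cases h2 : (n >>> 32) &&& 0xFFFF = 0 <;>
  by_cases h3 : (n >>> 48) &&& 0xFFFF = 0
  · -- everything zero: n = 0
    have hz : n = 0 := by rw [e0] at h0; rw [e1] at h1; rw [e2] at h2; rw [e3] at h3; omega
    subst hz
    simp
  all_goals {
    have hne : n ≠ 0 := by
      intro hz
      subst hz
      revert h0 h1 h2 h3
      decide
    have hts16 : PySem.Int.toStr (16 : Int) = "16" := by decide
    have hts32 : PySem.Int.toStr (32 : Int) = "32" := by decide
    have hts48 : PySem.Int.toStr (48 : Int) = "48" := by decide
    rw [movzFirst_closed reg n h64 hne]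
    simp [PySem.List.enumerate_cons, h0, h1, h2, h3, hne, hts16, hts32, hts48, String.append_assoc, lsl16, lsl32, lsl48]
  }

-- ===== VERDICT =====
theorem mov_imm_py_spec : Claim_equal_mov_imm_py := by
  intro reg value _
  exact main_eq reg value
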